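-- pv_equiv track=rewrite | github.com/DaWasteh/Goa-uld-Translator | yaml_loader.py | _build_primary_secondary
-- ===== SOURCE A (Python) =====
-- def _build_primary_secondary(
--     candidates: dict[str, list[tuple[int, str]]]
-- ) -> tuple[dict[str, str], dict[str, list[str]]]:
--     """
--     For each gloss, pick the highest-priority Goa'uld term as the primary
--     hit, and collect all other unique terms as secondary alternatives.
--     """
--     primary: dict[str, str] = {}
--     secondary: dict[str, list[str]] = {}
--
--     for gloss, cand_list in candidates.items():
--         # Sort by priority DESC, then term ascending for stability
--         sorted_cands = sorted(cand_list, key=lambda t: (-t[0], t[1]))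
--         # Dedupe while preserving order
--         seen = set()
--         ordered_unique_terms = []
--         for _prio, term in sorted_cands:
--             if term not in seen:
--                 seen.add(term)
--                 ordered_unique_terms.append(term)
--
--         if not ordered_unique_terms:
--             continue
--         primary[gloss] = ordered_unique_terms[0]
--         if len(ordered_unique_terms) > 1:
--             secondary[gloss] = ordered_unique_terms[1:]
--
--     return primary, secondary
-- ===== SOURCE B (Python) =====
-- def _build_primary_secondary(
--     candidates: dict[str, list[tuple[int, str]]]
-- ) -> tuple[dict[str, str], dict[str, list[str]]]:
--     def ranked(cand_list):
--         # Index each distinct term by its maximum priority, then sort the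
--         # distinct terms by (priority DESC, term ASC).
--         best: dict[str, int] = {}
--         for prio, term in cand_list:
--             best[term] = max(best.get(term, prio), prio)
--         return sorted(best, key=lambda t: (-best[t], t))
--
--     terms = [(gloss, ranked(cl)) for gloss, cl in candidates.items()]
--     primary = {gloss: ts[0] for gloss, ts in terms if ts}
--     secondary = {gloss: ts[1:] for gloss, ts in terms if len(ts) > 1}
--     return primary, secondary
-- ===== Notes on version B (the rewrite author's own statement) =====
-- stated objective: alternative
-- what changed: Per gloss, A sorts all candidate occurrences by (-priority, term) and dedups terms with a seen-set while filling both output dicts in one loop; B instead builds a term->max-priority index, sorts only the distinct terms, and then assembles primary and secondary in two separate staged dict comprehensions over the ranked lists.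
import Mathlib
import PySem

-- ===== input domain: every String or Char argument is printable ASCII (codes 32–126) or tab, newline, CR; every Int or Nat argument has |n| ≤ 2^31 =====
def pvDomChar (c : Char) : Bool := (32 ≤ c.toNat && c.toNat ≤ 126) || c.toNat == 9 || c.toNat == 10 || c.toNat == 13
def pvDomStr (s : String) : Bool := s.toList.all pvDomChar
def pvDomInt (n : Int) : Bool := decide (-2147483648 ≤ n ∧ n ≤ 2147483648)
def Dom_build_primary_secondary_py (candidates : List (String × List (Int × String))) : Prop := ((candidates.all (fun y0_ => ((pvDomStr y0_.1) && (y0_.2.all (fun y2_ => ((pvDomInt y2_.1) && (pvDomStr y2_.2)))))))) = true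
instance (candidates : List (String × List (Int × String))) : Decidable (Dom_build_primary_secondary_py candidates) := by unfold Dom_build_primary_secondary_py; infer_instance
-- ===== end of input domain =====

-- B replaces A's one-loop "sort all occurrences, seen-set dedup, fill both dicts" by a
-- staged pipeline: a ranked() helper (max-priority index over distinct terms, then sort
-- the distinct terms), then two separate dict comprehensions building primary/secondary
-- (alternative decomposition; same results, no speed claim).

-- ===== PORT A =====
def build_primary_secondary_py (candidates : List (String × List (Int × String))) : (List (String × String)) × (List (String × List String)) :=
  let r := candidates.foldl
    (fun (acc : PySem.Dict String String × PySem.Dict String (List String)) gc =>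
      -- sorted_cands = sorted(cand_list, key=lambda t: (-t[0], t[1]))
      let sorted_cands := PySem.List.sorted2 gc.2 (fun t => -t.1) (fun t => t.2)
      -- seen-set dedup loop; state = (seen, ordered_unique_terms)
      let st := sorted_cands.foldl
        (fun (st : PySem.Set String × List String) p =>
          if PySem.Set.contains st.1 p.2 then st
          else (PySem.Set.add st.1 p.2, st.2 ++ [p.2]))
        (PySem.Set.empty, [])
      -- 'if not ordered: continue' / ordered[0] / ordered[1:]
      match st.2 with
      | [] => acc
      | h :: tl => (acc.1.insert gc.1 h, if tl = [] then acc.2 else acc.2.insert gc.1 tl))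
    (PySem.Dict.empty, PySem.Dict.empty)
  (r.1.items, r.2.items)

-- ===== PORT B =====
-- ranked(cand_list): best[term] = max(best.get(term, prio), prio) in one pass,
-- then sorted(best, key=lambda t: (-best[t], t)); the key lookup always hits
-- (t ranges over best's keys), so getD's default 0 is never used — exact.
def pvRanked (cand_list : List (Int × String)) : List String :=
  let best := cand_list.foldl
    (fun (d : PySem.Dict String Int) p => d.insert p.2 (max (d.getD p.2 p.1) p.1))
    PySem.Dict.empty
  PySem.List.sorted2 best.keys (fun t => -(best.getD t 0)) (fun t => t)

def build_primary_secondary_py_alt (candidates : List (String × List (Int × String))) : (List (String × String)) × (List (String × List String)) :=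
  -- terms = [(gloss, ranked(cl)) for gloss, cl in candidates.items()]
  let terms := candidates.map (fun gc => (gc.1, pvRanked gc.2))
  -- primary = {gloss: ts[0] for gloss, ts in terms if ts}
  let primary := terms.foldl
    (fun (d : PySem.Dict String String) gt =>
      match gt.2 with
      | [] => d
      | h :: _ => d.insert gt.1 h)
    PySem.Dict.empty
  -- secondary = {gloss: ts[1:] for gloss, ts in terms if len(ts) > 1}
  let secondary := terms.foldl
    (fun (d : PySem.Dict String (List String)) gt =>
      match gt.2 with
      | _ :: t :: ts => d.insert gt.1 (t :: ts)
      | _ => d)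
    PySem.Dict.empty
  (primary.items, secondary.items)

-- ===== PRECONDITION & SPEC =====
def Spec_build_primary_secondary_py (candidates : List (String × List (Int × String))) (out : (List (String × String)) × (List (String × List String))) : Prop := out = build_primary_secondary_py_alt candidates
instance (candidates : List (String × List (Int × String))) (out : (List (String × String)) × (List (String × List String))) : Decidable (Spec_build_primary_secondary_py candidates out) := by unfold Spec_build_primary_secondary_py; infer_instance

-- ===== CLAIM (what is proved, stated in full; the proofs are below) =====
def Claim_equal_build_primary_secondary_py : Prop := ∀ (candidates : List (String × List (Int × String))), Dom_build_primary_secondary_py candidates → Spec_build_primary_secondary_py candidates (build_primary_secondary_py candidates)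

-- ===== LEMMAS AND PROOFS =====

-- A's sort key (-prio, term) as a single lexicographic key.
def keyA (p : Int × String) : Lex (Int × String) := toLex (-p.1, p.2)

-- B's per-gloss max-priority dict fold.
def bStep (d : PySem.Dict String Int) (p : Int × String) : PySem.Dict String Int :=
  d.insert p.2 (max (d.getD p.2 p.1) p.1)

-- sorted2 with Int/String keys is sorted with the lexicographic pair key.
theorem sorted2_eq_sorted_toLex {α : Type} (xs : List α) (k1 : α → Int) (k2 : α → String) :
    PySem.List.sorted2 xs k1 k2 = PySem.List.sorted xs (fun x => toLex (k1 x, k2 x)) := by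
  rw [PySem.List.sorted_eq_foldl_insertBy]
  simp only [PySem.List.sorted2]
  congr 1
  funext acc a
  congr 1
  funext x y
  rcases lt_trichotomy (k1 x) (k1 y) with h | h | h
  · simp [Prod.Lex.toLex_lt_toLex, h, lt_asymm h]
  · simp [Prod.Lex.toLex_lt_toLex, h]
  · simp [Prod.Lex.toLex_lt_toLex, h, lt_asymm h, h.ne']

-- A's seen-set dedup loop keeps seen = out; the result is Set.update.
theorem dedup_loop (l : List (Int × String)) : ∀ (acc : List String),
    l.foldl
      (fun (st : PySem.Set String × List String) p =>
        if PySem.Set.contains st.1 p.2 then st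
        else (PySem.Set.add st.1 p.2, st.2 ++ [p.2]))
      (acc, acc)
    = (PySem.Set.update acc (l.map (·.2)), PySem.Set.update acc (l.map (·.2))) := by
  induction l with
  | nil => intro acc; simp [PySem.Set.update_nil]
  | cons p l ih =>
    intro acc
    simp only [List.foldl_cons, List.map_cons, PySem.Set.update_cons]
    by_cases h : PySem.Set.contains acc p.2
    · have h' : p.2 ∈ acc := by simpa [PySem.Set.contains, List.contains_iff_mem] using h
      have hadd : PySem.Set.add acc p.2 = acc := by
        simp [PySem.Set.add, PySem.Set.contains, List.contains_iff_mem, h']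
      simp only [h, if_pos, hadd]
      exact ih acc
    · have h' : p.2 ∉ acc := by simpa [PySem.Set.contains, List.contains_iff_mem] using h
      have hadd : PySem.Set.add acc p.2 = acc ++ [p.2] := by
        simp [PySem.Set.add, PySem.Set.contains, List.contains_iff_mem, h']
      simp only [h, if_neg, Bool.false_eq_true, not_false_iff, if_false, hadd]
      have := ih (acc ++ [p.2])
      rw [← hadd] at this ⊢
      exact this

-- the dict value at a key never decreases along the fold
theorem bfold_mono : ∀ (l : List (Int × String)) (d : PySem.Dict String Int) (t : String) (v : Int),
    d.get? t = some v → ∃ w, (l.foldl bStep d).get? t = some w ∧ v ≤ w := by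
  intro l
  induction l with
  | nil => intro d t v h; exact ⟨v, h, le_rfl⟩
  | cons p l ih =>
    intro d t v h
    simp only [List.foldl_cons]
    by_cases ht : t = p.2
    · subst ht
      have h1 : (bStep d p).get? p.2 = some (max (d.getD p.2 p.1) p.1) := by
        simp only [bStep]; exact PySem.Dict.get?_insert_self d p.2 _
      obtain ⟨w, hw, hle⟩ := ih (bStep d p) p.2 _ h1
      refine ⟨w, hw, ?_⟩
      have : v ≤ max (d.getD p.2 p.1) p.1 := by
        simp [PySem.Dict.getD, h]
      omega
    · have h1 : (bStep d p).get? t = d.get? t := by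
        simp only [bStep]; exact PySem.Dict.get?_insert_of_ne d _ ht
      exact ih (bStep d p) t v (h1.trans h)

-- every occurrence's priority is bounded by the folded dict's value at its term
theorem bfold_le : ∀ (l : List (Int × String)) (d : PySem.Dict String Int) (p : Int × String),
    p ∈ l → ∃ w, (l.foldl bStep d).get? p.2 = some w ∧ p.1 ≤ w := by
  intro l
  induction l with
  | nil => intro d p h; cases h
  | cons q l ih =>
    intro d p hp
    simp only [List.foldl_cons]
    rcases List.mem_cons.mp hp with rfl | hp
    · have h1 : (bStep d p).get? p.2 = some (max (d.getD p.2 p.1) p.1) := by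
        simp only [bStep]; exact PySem.Dict.get?_insert_self d p.2 _
      obtain ⟨w, hw, hle⟩ := bfold_mono l (bStep d p) p.2 _ h1
      exact ⟨w, hw, le_trans (le_max_right _ _) hle⟩
    · exact ih (bStep d q) p hp

-- the folded dict's value at a term is attained by some occurrence
theorem bfold_attained : ∀ (l : List (Int × String)) (d : PySem.Dict String Int) (t : String) (v : Int),
    (l.foldl bStep d).get? t = some v → (v, t) ∈ l ∨ d.get? t = some v := by
  intro l
  induction l with
  | nil => intro d t v h; exact Or.inr h
  | cons p l ih =>
    intro d t v h
    simp only [List.foldl_cons] at h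
    rcases ih (bStep d p) t v h with hmem | hd
    · exact Or.inl (List.mem_cons_of_mem _ hmem)
    · simp only [bStep] at hd
      by_cases ht : t = p.2
      · subst ht
        rw [PySem.Dict.get?_insert_self] at hd
        have hv : v = max (d.getD p.2 p.1) p.1 := (Option.some.injEq _ _).mp hd.symm
        cases hdg : d.get? p.2 with
        | none =>
          have : v = p.1 := by simp [PySem.Dict.getD, hdg] at hv; omega
          subst this
          exact Or.inl (by simp)
        | some w =>
          have hv' : v = max w p.1 := by simpa [PySem.Dict.getD, hdg] using hv
          rcases max_choice w p.1 with hmx | hmx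
          · refine Or.inr ?_
            rw [hv', hmx]
          · refine Or.inl ?_
            have : v = p.1 := by omega
            subst this
            exact List.mem_cons_self
      · rw [PySem.Dict.get?_insert_of_ne d _ ht] at hd
        exact Or.inr hd

-- core invariant: folding Set.add over the terms of a keyA-sorted list yields a
-- list that is strictly increasing under g (= B's sort key), given that g is a
-- lower bound attained at each term's best occurrence.
theorem upd_pairwise (g : String → Lex (Int × String)) (ginj : ∀ a b, g a = g b → a = b) :
    ∀ (s : List (Int × String)) (acc : List String),
    s.Pairwise (fun p q => keyA p ≤ keyA q) →
    (∀ p ∈ s, p.2 ∉ acc → g p.2 ≤ keyA p) →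
    (∀ p ∈ s, p.2 ∉ acc → ∃ pw ∈ s, pw.2 = p.2 ∧ keyA pw = g p.2) →
    acc.Pairwise (fun a b => g a < g b) →
    (∀ a ∈ acc, ∀ p ∈ s, p.2 ∉ acc → g a < g p.2) →
    (PySem.Set.update acc (s.map (·.2))).Pairwise (fun a b => g a < g b) := by
  intro s
  induction s with
  | nil => intro acc _ _ _ hacc _; simpa [PySem.Set.update_nil] using hacc
  | cons p0 rest ih =>
    intro acc hpw hC1 hC2 hacc hcross
    simp only [List.map_cons, PySem.Set.update_cons]
    rw [List.pairwise_cons] at hpw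
    obtain ⟨hp0le, hpwrest⟩ := hpw
    by_cases hmem : p0.2 ∈ acc
    · have hadd : PySem.Set.add acc p0.2 = acc := by
        simp [PySem.Set.add, PySem.Set.contains, List.contains_iff_mem, hmem]
      rw [hadd]
      refine ih acc hpwrest ?_ ?_ hacc ?_
      · intro p hp hnp; exact hC1 p (List.mem_cons_of_mem _ hp) hnp
      · intro p hp hnp
        obtain ⟨pw, hpwmem, hpw2, hpwk⟩ := hC2 p (List.mem_cons_of_mem _ hp) hnp
        rcases List.mem_cons.mp hpwmem with rfl | hpwmem'
        · exact absurd (hpw2 ▸ hmem) hnp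
        · exact ⟨pw, hpwmem', hpw2, hpwk⟩
      · intro a ha q hq hnq; exact hcross a ha q (List.mem_cons_of_mem _ hq) hnq
    · have hadd : PySem.Set.add acc p0.2 = acc ++ [p0.2] := by
        simp [PySem.Set.add, PySem.Set.contains, List.contains_iff_mem, hmem]
      rw [hadd]
      -- key step: for every q ∈ rest with q.2 fresh and q.2 ≠ p0.2, g p0.2 < g q.2
      have hkey : ∀ q ∈ rest, q.2 ∉ acc → q.2 ≠ p0.2 → g p0.2 < g q.2 := by
        intro q hq hnq hne
        obtain ⟨pw, hpwmem, hpw2, hpwk⟩ :=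
          hC2 q (List.mem_cons_of_mem _ hq) hnq
        have hpwrest' : pw ∈ rest := by
          rcases List.mem_cons.mp hpwmem with rfl | h'
          · exact absurd hpw2 (Ne.symm hne)
          · exact h'
        have h1 : g p0.2 ≤ keyA p0 := hC1 p0 List.mem_cons_self hmem
        have h2 : keyA p0 ≤ keyA pw := hp0le pw hpwrest'
        have h3 : g p0.2 ≤ g q.2 := le_trans (le_trans h1 h2) (le_of_eq hpwk)
        exact lt_of_le_of_ne h3 (fun he => hne ((ginj _ _ he).symm))
      refine ih (acc ++ [p0.2]) hpwrest ?_ ?_ ?_ ?_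
      · intro q hq hnq
        exact hC1 q (List.mem_cons_of_mem _ hq) (fun h => hnq (List.mem_append_left _ h))
      · intro q hq hnq
        have hne : q.2 ≠ p0.2 := by
          intro h; exact hnq (by simp [h])
        obtain ⟨pw, hpwmem, hpw2, hpwk⟩ :=
          hC2 q (List.mem_cons_of_mem _ hq) (fun h => hnq (List.mem_append_left _ h))
        rcases List.mem_cons.mp hpwmem with rfl | h'
        · exact absurd hpw2 (Ne.symm hne)
        · exact ⟨pw, h', hpw2, hpwk⟩
      · rw [List.pairwise_append]
        refine ⟨hacc, by simp, ?_⟩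
        intro a ha b hb
        rw [List.mem_singleton] at hb
        subst hb
        exact hcross a ha p0 List.mem_cons_self hmem
      · intro a ha q hq hnq
        have hnacc : q.2 ∉ acc := fun h => hnq (List.mem_append_left _ h)
        have hne : q.2 ≠ p0.2 := by intro h; exact hnq (by simp [h])
        rcases List.mem_append.mp ha with ha' | ha'
        · exact hcross a ha' q (List.mem_cons_of_mem _ hq) hnacc
        · rw [List.mem_singleton] at ha'
          subst ha'
          exact hkey q hq hnacc hne

-- per-gloss: A's "sort then dedup" list equals B's ranked() list
theorem terms_eq (cand : List (Int × String)) :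
    ((PySem.List.sorted2 cand (fun t => -t.1) (fun t => t.2)).foldl
      (fun (st : PySem.Set String × List String) p =>
        if PySem.Set.contains st.1 p.2 then st
        else (PySem.Set.add st.1 p.2, st.2 ++ [p.2]))
      (PySem.Set.empty, [])).2
    = pvRanked cand := by
  unfold pvRanked
  have hbstep : (fun (d : PySem.Dict String Int) p => d.insert p.2 (max (d.getD p.2 p.1) p.1)) = bStep := rfl
  rw [hbstep]
  set d := cand.foldl bStep PySem.Dict.empty with hd
  set s := PySem.List.sorted2 cand (fun t => -t.1) (fun t => t.2) with hs
  -- LHS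
  have hempty : (PySem.Set.empty : PySem.Set String) = ([] : List String) := rfl
  have hlhs : (s.foldl
      (fun (st : PySem.Set String × List String) p =>
        if PySem.Set.contains st.1 p.2 then st
        else (PySem.Set.add st.1 p.2, st.2 ++ [p.2]))
      (PySem.Set.empty, [])).2 = PySem.Set.ofList (s.map (·.2)) := by
    rw [hempty, dedup_loop s []]
    simp [PySem.Set.update_nil_left]
  rw [hlhs]
  -- RHS keys
  have hkeys : d.keys = PySem.Set.ofList (cand.map (·.2)) := by
    rw [hd]
    have : cand.foldl bStep PySem.Dict.empty
        = cand.foldl (fun d x => d.insert ((fun p : Int × String => p.2) x)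
            ((fun (d : PySem.Dict String Int) (p : Int × String) => max (d.getD p.2 p.1) p.1) d x)) PySem.Dict.empty := rfl
    rw [this, PySem.Dict.keys_foldl_insert_key]
    have hek : (PySem.Dict.empty : PySem.Dict String Int).keys = [] := rfl
    rw [hek, PySem.Set.update_nil_left]
  -- B's key as a single lexicographic key g
  set g : String → Lex (Int × String) := fun t => toLex (-(d.getD t 0), t) with hg
  have ginj : ∀ a b, g a = g b → a = b := by
    intro a b h
    rw [hg] at h
    have := toLex.injective h
    exact (Prod.mk.injEq _ _ _ _ ▸ this).2
  have hrhs : PySem.List.sorted2 d.keys (fun t => -(d.getD t 0)) (fun t => t)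
      = PySem.List.sorted d.keys g := by
    rw [sorted2_eq_sorted_toLex]
  rw [hrhs, hkeys]
  -- the sorted list s, with a single lexicographic key keyA
  have hsA : s = PySem.List.sorted cand keyA := by
    rw [hs, sorted2_eq_sorted_toLex]; rfl
  have hsperm : s.Perm cand := hsA ▸ PySem.List.sorted_perm cand keyA false
  have hspw : s.Pairwise (fun p q => keyA p ≤ keyA q) := by
    rw [hsA]; exact PySem.List.sorted_pairwise cand keyA
  -- C1 and C2
  have hC1 : ∀ p ∈ s, g p.2 ≤ keyA p := by
    intro p hp
    have hpc : p ∈ cand := hsperm.mem_iff.mp hp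
    obtain ⟨w, hw, hle⟩ := bfold_le cand PySem.Dict.empty p hpc
    rw [← hd] at hw
    have hgd : d.getD p.2 0 = w := by simp [PySem.Dict.getD, hw]
    simp only [hg, hgd, keyA]
    rcases lt_or_eq_of_le hle with h | h
    · exact le_of_lt (by rw [Prod.Lex.toLex_lt_toLex]; left; omega)
    · subst h; exact le_refl _
  have hC2 : ∀ p ∈ s, ∃ pw ∈ s, pw.2 = p.2 ∧ keyA pw = g p.2 := by
    intro p hp
    have hpc : p ∈ cand := hsperm.mem_iff.mp hp
    obtain ⟨w, hw, _⟩ := bfold_le cand PySem.Dict.empty p hpc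
    rw [← hd] at hw
    have hgd : d.getD p.2 0 = w := by simp [PySem.Dict.getD, hw]
    have hattn : (w, p.2) ∈ cand := by
      rcases bfold_attained cand PySem.Dict.empty p.2 w (hd ▸ hw) with h | h
      · exact h
      · exact absurd h (by simp [PySem.Dict.get?, PySem.Dict.empty])
    refine ⟨(w, p.2), hsperm.mem_iff.mpr hattn, rfl, ?_⟩
    simp only [hg, hgd, keyA]
  -- assemble via the sorted characterisation
  refine (PySem.List.sorted_eq_of_perm_of_pairwise_lt _ _ g ?_ ?_).symm
  · -- Perm
    apply (List.perm_ext_iff_of_nodup (PySem.Set.nodup_ofList _) (PySem.Set.nodup_ofList _)).mpr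
    intro a
    rw [PySem.Set.mem_ofList, PySem.Set.mem_ofList]
    exact (hsperm.map (·.2)).mem_iff
  · -- Pairwise
    have := upd_pairwise g ginj s [] hspw
      (fun p hp _ => hC1 p hp) (fun p hp _ => hC2 p hp)
      List.Pairwise.nil (fun a ha => absurd ha (List.not_mem_nil))
    simpa [PySem.Set.update_nil_left] using this

-- A's one fold over a pair of dicts splits into B's two staged folds over the ranked lists.
theorem split_fold : ∀ (l : List (String × List (Int × String)))
    (a1 : PySem.Dict String String) (a2 : PySem.Dict String (List String)),
    l.foldl
      (fun (acc : PySem.Dict String String × PySem.Dict String (List String)) gc =>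
        let sorted_cands := PySem.List.sorted2 gc.2 (fun t => -t.1) (fun t => t.2)
        let st := sorted_cands.foldl
          (fun (st : PySem.Set String × List String) p =>
            if PySem.Set.contains st.1 p.2 then st
            else (PySem.Set.add st.1 p.2, st.2 ++ [p.2]))
          (PySem.Set.empty, [])
        match st.2 with
        | [] => acc
        | h :: tl => (acc.1.insert gc.1 h, if tl = [] then acc.2 else acc.2.insert gc.1 tl))
      (a1, a2)
    = ((l.map (fun gc => (gc.1, pvRanked gc.2))).foldl
        (fun (d : PySem.Dict String String) gt =>
          match gt.2 with
          | [] => d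
          | h :: _ => d.insert gt.1 h) a1,
       (l.map (fun gc => (gc.1, pvRanked gc.2))).foldl
        (fun (d : PySem.Dict String (List String)) gt =>
          match gt.2 with
          | _ :: t :: ts => d.insert gt.1 (t :: ts)
          | _ => d) a2) := by
  intro l
  induction l with
  | nil => intro a1 a2; rfl
  | cons gc l ih =>
    intro a1 a2
    simp only [List.foldl_cons, List.map_cons]
    rw [terms_eq gc.2]
    cases hr : pvRanked gc.2 with
    | nil => exact ih a1 a2
    | cons h tl =>
      cases tl with
      | nil => simpa using ih (a1.insert gc.1 h) a2
      | cons t ts => simpa using ih (a1.insert gc.1 h) (a2.insert gc.1 (t :: ts))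

-- ===== VERDICT (by name: the statement is the Claim_ definition above) =====
theorem build_primary_secondary_py_spec : Claim_equal_build_primary_secondary_py := by
  intro candidates _
  unfold Spec_build_primary_secondary_py
  unfold build_primary_secondary_py build_primary_secondary_py_alt
  rw [split_fold]
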